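-- pv_equiv track=rewrite | github.com/snowthesprite/assignment-problems | Assignment_12/tally_sort.py | tally_sort
-- ===== SOURCE A (Python) =====
-- def tally_sort(num_list) :
--     minimum = min(num_list)
--     new_num_list = [num - minimum for num in num_list]
--     maximum = max(new_num_list)
--     tally = [0 for _ in range(maximum + 1)]
--     for num in new_num_list :
--         tally[num] += 1
--     return tally
-- ===== SOURCE B (Python) =====
-- def tally_sort(num_list):
--     s = sorted(num_list)
--     prev = s[0]
--     run = 0
--     tally = []
--     for x in s:
--         if x == prev:
--             run += 1
--         else:
--             tally.append(run)
--             tally.extend([0] * (x - prev - 1))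
--             prev = x
--             run = 1
--     tally.append(run)
--     return tally
-- ===== Notes on version B (the rewrite author's own statement) =====
-- stated objective: alternative
-- what changed: Sort-then-scan instead of table building: B sorts the list and emits the histogram in one run-length scan over the sorted order (appending run lengths and zero gaps), with no shifted copy and no preallocated zero table mutated by index.
-- outside the precondition, e.g. on tally_sort([]): A raises ValueError, B raises IndexError
import Mathlib
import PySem

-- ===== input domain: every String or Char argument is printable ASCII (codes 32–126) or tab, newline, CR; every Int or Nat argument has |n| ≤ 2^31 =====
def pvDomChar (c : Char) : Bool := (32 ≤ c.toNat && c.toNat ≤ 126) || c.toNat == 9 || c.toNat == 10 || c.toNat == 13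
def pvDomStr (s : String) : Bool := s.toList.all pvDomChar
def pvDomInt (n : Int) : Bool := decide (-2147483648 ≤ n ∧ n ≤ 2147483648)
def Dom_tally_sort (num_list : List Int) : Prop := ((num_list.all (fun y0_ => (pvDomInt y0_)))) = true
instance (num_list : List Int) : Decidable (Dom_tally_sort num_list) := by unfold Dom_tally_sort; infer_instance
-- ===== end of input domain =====

-- B replaces A's shifted copy + preallocated zero table + increment pass by sort-then-scan:
-- sort the list once and emit the histogram in a single run-length scan over the sorted
-- order, appending each run's length and the zero gap before the next value (objective:
-- alternative; no speed claim).

-- ===== PORT A =====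
def tally_sort (num_list : List Int) : List Int :=
  match PySem.List.min? num_list (fun x => x) with
  | none => []
  | some minimum =>
    let new_num_list := num_list.map (fun num => num - minimum)
    match PySem.List.max? new_num_list (fun x => x) with
    | none => []
    | some maximum =>
      let tally := (PySem.List.pyRange 0 (maximum + 1) 1).map (fun _ => (0 : Int))
      new_num_list.foldl
        (fun t num => PySem.List.pySetD t num (PySem.List.pyGetD t num 0 + 1)) tally

-- ===== PORT B =====
-- the 'for x in s' loop of Source B, carrying its state (tally, prev, run)
def tallyLoop : List Int → List Int → Int → Int → List Int
  | [], tally, _, run => tally ++ [run]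
  | x :: xs, tally, prev, run =>
    if x = prev then tallyLoop xs tally prev (run + 1)
    else tallyLoop xs (tally ++ [run] ++ List.replicate (x - prev - 1).toNat 0) x 1

def tally_sort_alt (num_list : List Int) : List Int :=
  let s := PySem.List.sorted num_list (fun x => x) false
  match s with
  | [] => []
  | p :: _ => tallyLoop s [] p 0

-- ===== PRECONDITION & SPEC =====
-- Pre_ excludes only the empty list, on which A raises ValueError (min([])) and B IndexError (s[0]).
def Pre_tally_sort (num_list : List Int) : Prop := num_list ≠ []
instance (num_list : List Int) : Decidable (Pre_tally_sort num_list) := by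
  unfold Pre_tally_sort; infer_instance
def pvWitness_tally_sort : List Int := [3, 1, 2, 1]

def Spec_tally_sort (num_list : List Int) (out : List Int) : Prop := out = tally_sort_alt num_list
instance (num_list : List Int) (out : List Int) : Decidable (Spec_tally_sort num_list out) := by
  unfold Spec_tally_sort; infer_instance

-- ===== CLAIM (what is proved, stated in full; the proofs are below) =====
def Claim_equal_tally_sort : Prop := ∀ (num_list : List Int), Dom_tally_sort num_list → Pre_tally_sort num_list → Spec_tally_sort num_list (tally_sort num_list)

-- ===== LEMMAS AND PROOFS =====

-- B's run-length scan over a sorted tail xs (all ≥ prev) appends, for each value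
-- prev, prev+1, …, max(prev, elements of xs), its number of occurrences in xs
-- (occurrences of prev already seen are carried in run).
theorem tallyLoop_eq (xs : List Int) (tally : List Int) (prev run : Int)
    (h : (prev :: xs).Pairwise (· ≤ ·)) :
    tallyLoop xs tally prev run =
      tally ++ (List.range ((xs.foldl max prev - prev).toNat + 1)).map
        (fun (j : Nat) => (if j = 0 then run else 0) + ((xs.count (prev + (j : Int))) : Int)) := by
  induction xs generalizing tally prev run with
  | nil => simp [tallyLoop]
  | cons x xs ih =>
    have hpx : prev ≤ x := (List.pairwise_cons.mp h).1 x (by simp)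
    have hxs : (x :: xs).Pairwise (· ≤ ·) := (List.pairwise_cons.mp h).2
    have hxall : ∀ y ∈ xs, x ≤ y := (List.pairwise_cons.mp hxs).1
    by_cases hx : x = prev
    · subst hx
      rw [tallyLoop, if_pos rfl, ih tally x (run + 1) hxs]
      have hfold : (x :: xs).foldl max x = xs.foldl max x := by
        simp [List.foldl_cons, max_self]
      rw [hfold]
      congr 1
      apply List.map_congr_left
      intro j _
      by_cases hj : j = 0
      · subst hj; simp; ring
      · have hne : x + (j : Int) ≠ x := by
          intro hc; apply hj; omega
        simp [hj, hne.symm]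
    · have hlt : prev < x := lt_of_le_of_ne hpx (fun e => hx e.symm)
      rw [tallyLoop, if_neg hx, ih _ x 1 hxs]
      have hMx : x ≤ xs.foldl max x := (PySem.List.le_foldl_max xs x).1
      have hfold : (x :: xs).foldl max prev = xs.foldl max x := by
        simp [List.foldl_cons, max_eq_right hpx]
      rw [hfold]
      set M := xs.foldl max x with hM
      set g := (x - prev - 1).toNat with hg
      have hgx : (g : Int) = x - prev - 1 := by omega
      set f : Nat → Int := fun (j : Nat) =>
        (if j = 0 then run else 0) + (((x :: xs).count (prev + (j : Int)) : Nat) : Int) with hf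
      have hN : (M - prev).toNat + 1 = (1 + g) + ((M - x).toNat + 1) := by omega
      conv_rhs => rw [hN, List.range_add, List.range_add]
      have h1 : (List.range 1).map f = [run] := by
        have hc : ((x :: xs).count prev) = 0 := by
          rw [List.count_eq_zero]
          intro hmem
          rcases List.mem_cons.mp hmem with h1 | h1
          · exact hx h1.symm
          · exact absurd (hxall _ h1) (by omega)
        simp [hf, List.range_one, hc]
      have h2 : ((List.range g).map (fun i => 1 + i)).map f = List.replicate g 0 := by
        rw [List.map_map]
        have hz : ∀ i ∈ List.range g, (f ∘ fun i => 1 + i) i = (0 : Int) := by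
          intro i hi
          have hig : i < g := List.mem_range.mp hi
          have hcz : ((x :: xs).count (prev + (1 + (i : Int)))) = 0 := by
            rw [List.count_eq_zero]
            intro hmem
            rcases List.mem_cons.mp hmem with h1 | h1
            · apply absurd h1.symm; intro e; omega
            · have := hxall _ h1; omega
          simp [hf, Function.comp, hcz]
        rw [List.map_congr_left hz]
        simp [List.map_const']
      have h3 : ((List.range ((M - x).toNat + 1)).map (fun i => 1 + g + i)).map f
          = (List.range ((M - x).toNat + 1)).map
            (fun (j : Nat) => (if j = 0 then (1:Int) else 0) + ((xs.count (x + (j : Int)) : Nat) : Int)) := by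
        rw [List.map_map]
        apply List.map_congr_left
        intro i _
        simp only [Function.comp_apply, hf]
        have hcast : prev + ((1 + g + i : Nat) : Int) = x + (i : Int) := by push_cast; omega
        rw [hcast]
        by_cases hi : i = 0
        · subst hi
          simp
          omega
        · have hne : x + (i : Int) ≠ x := by intro hc; apply hi; omega
          have hij : ¬ (1 + g + i = 0) := by omega
          simp [hi, hne.symm]
      rw [List.map_append, List.map_append, h1, h2, h3]
      simp [List.append_assoc]

-- A's increment loop, started from any table t whose indices cover all of l,
-- adds count l j to entry j.
theorem foldl_incr_getElem (l : List Int) (t : List Int)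
    (hl : ∀ x ∈ l, 0 ≤ x ∧ x < (t.length : Int)) :
    (l.foldl (fun t num => PySem.List.pySetD t num (PySem.List.pyGetD t num 0 + 1)) t).length
      = t.length ∧
    ∀ j : Nat, j < t.length →
      (l.foldl (fun t num => PySem.List.pySetD t num (PySem.List.pyGetD t num 0 + 1)) t)[j]! =
        t[j]! + (l.count (j : Int) : Int) := by
  induction l generalizing t with
  | nil => simp
  | cons x xs ih =>
    obtain ⟨hx0, hxl⟩ := hl x (by simp)
    have hxlt : x.toNat < t.length := by omega
    have hset : PySem.List.pySetD t x (PySem.List.pyGetD t x 0 + 1)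
        = t.set x.toNat (t[x.toNat]! + 1) := by
      rw [PySem.List.pySetD_of_nonneg t (PySem.List.pyGetD t x 0 + 1) hx0,
        PySem.List.pyGetD_eq_getElem t 0 hx0 hxl]
      simp [hxlt]
    have hlen : (t.set x.toNat (t[x.toNat]! + 1)).length = t.length := by simp
    have hxs : ∀ y ∈ xs, 0 ≤ y ∧ y < ((t.set x.toNat (t[x.toNat]! + 1)).length : Int) := by
      intro y hy; have := hl y (by simp [hy]); omega
    obtain ⟨ihlen, ihget⟩ := ih (t.set x.toNat (t[x.toNat]! + 1)) hxs
    constructor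
    · simpa [hset, hlen] using ihlen
    · intro j hj
      have hj' : j < (t.set x.toNat (t[x.toNat]! + 1)).length := by simpa using hj
      have := ihget j hj'
      simp only [List.foldl_cons, hset]
      rw [this]
      have hsetj : (t.set x.toNat (t[x.toNat]! + 1))[j]! =
          if j = x.toNat then t[x.toNat]! + 1 else t[j]! := by
        by_cases h : j = x.toNat
        · subst h; simp [hxlt]
        · simp [List.getElem!_eq_getElem?_getD, List.getElem?_set_ne (by omega : x.toNat ≠ j), h]
      rw [hsetj]
      by_cases h : j = x.toNat
      · subst h
        have hx : x = (x.toNat : Int) := by omega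
        rw [List.count_cons]
        simp [← hx]
        ring
      · have hne : (j : Int) ≠ x := by omega
        rw [List.count_cons]
        simp [hne.symm, h]

theorem tally_sort_spec_aux (num_list : List Int) (h : num_list ≠ []) :
    tally_sort num_list = tally_sort_alt num_list := by
  -- name the sorted list and its head/tail
  have hsne : PySem.List.sorted num_list (fun x => x) false ≠ [] := by
    simpa [PySem.List.sorted_eq_nil_iff] using h
  obtain ⟨p, t, hs⟩ := List.exists_cons_of_ne_nil hsne
  have hperm : (p :: t).Perm num_list := by
    rw [← hs]; exact PySem.List.sorted_perm num_list (fun x => x) false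
  have hpair : (p :: t).Pairwise (· ≤ ·) := by
    have := PySem.List.sorted_pairwise num_list (fun x => x)
    rw [hs] at this; exact this
  -- the minimum exists and equals p
  obtain ⟨m, hmin⟩ : ∃ m, PySem.List.min? num_list (fun x => x) = some m := by
    cases hmin : PySem.List.min? num_list (fun x => x) with
    | none => exact absurd ((PySem.List.min?_eq_none_iff num_list _).mp hmin) h
    | some m => exact ⟨m, rfl⟩
  have hmmem : m ∈ num_list := PySem.List.min?_mem hmin
  have hmle : ∀ y ∈ num_list, m ≤ y := by
    intro y hy; simpa using PySem.List.min?_isMin hmin y hy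
  have hpmem : p ∈ num_list := hperm.mem_iff.mp (by simp)
  have hple : ∀ y ∈ num_list, p ≤ y := fun y hy =>
    PySem.List.key_head_sorted_le num_list (fun x => x) hs y hy
  have hpm : p = m := le_antisymm (hple m hmmem) (hmle p hpmem)
  -- the maximum M of the sorted list
  set M := t.foldl max p with hMdef
  have hmaxs : PySem.List.max? (p :: t) (fun x => x) = some M :=
    PySem.List.max?_id_cons p t
  have hMmem : M ∈ num_list := hperm.mem_iff.mp (PySem.List.max?_mem hmaxs)
  have hMge : ∀ y ∈ num_list, y ≤ M := by
    intro y hy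
    simpa using PySem.List.max?_isMax hmaxs y (hperm.mem_iff.mpr hy)
  have hmM : m ≤ M := hmle M hMmem
  -- A side
  unfold tally_sort
  rw [hmin]
  simp only []
  set new_num_list := num_list.map (fun num => num - m) with hnew
  have hmax_new : PySem.List.max? new_num_list (fun x => x) = some (M - m) := by
    cases hmx : PySem.List.max? new_num_list (fun x => x) with
    | none =>
      have : new_num_list = [] := (PySem.List.max?_eq_none_iff new_num_list _).mp hmx
      simp [hnew, h] at this
    | some mx =>
      have hmxmem : mx ∈ new_num_list := PySem.List.max?_mem hmx
      obtain ⟨y, hy, hyx⟩ := List.mem_map.mp hmxmem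
      have h1 : mx ≤ M - m := by
        have := hMge y hy; omega
      have h2 : M - m ≤ mx := by
        have hMm : M - m ∈ new_num_list := List.mem_map.mpr ⟨M, hMmem, rfl⟩
        simpa using PySem.List.max?_isMax hmx _ hMm
      exact congrArg some (by omega : mx = M - m)
  rw [hmax_new]
  simp only []
  set tally := (PySem.List.pyRange 0 (M - m + 1) 1).map (fun _ => (0 : Int)) with ht
  have hlen : tally.length = (M - m + 1).toNat := by
    simp [ht, PySem.List.length_pyRange_one]
  have hb : ∀ x ∈ new_num_list, 0 ≤ x ∧ x < (tally.length : Int) := by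
    intro x hx
    obtain ⟨y, hy, rfl⟩ := List.mem_map.mp hx
    have h1 := hmle y hy
    have h2 := hMge y hy
    rw [hlen]
    omega
  obtain ⟨hlen2, hget⟩ := foldl_incr_getElem new_num_list tally hb
  -- counts transfer from the sorted list to the shifted list
  have hcount : ∀ j : Nat, ((p :: t).count (p + (j : Int)) : Int) = (new_num_list.count (j : Int) : Int) := by
    intro j
    have h1 : (p :: t).count (p + (j : Int)) = num_list.count (p + (j : Int)) :=
      hperm.count_eq _
    have h2 : new_num_list.count ((j : Nat) : Int) = num_list.count (p + (j : Int)) := by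
      rw [hnew, List.count_eq_countP, List.count_eq_countP, List.countP_map]
      apply List.countP_congr
      intro y _
      simp only [Function.comp_apply, beq_iff_eq]
      constructor
      · intro hc; omega
      · intro hc; omega
    rw [h1, h2]
  -- B side
  unfold tally_sort_alt
  rw [hs]
  simp only []
  rw [tallyLoop, if_pos rfl, tallyLoop_eq t [] p (0 + 1) hpair]
  rw [← hMdef]
  simp only [List.nil_append]
  -- both sides elementwise
  apply List.ext_getElem
  · rw [hlen2, hlen]
    simp
    omega
  · intro j hj1 hj2
    have hjlt : j < tally.length := by rw [hlen]; omega
    have hA := hget j hjlt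
    have htallyj : tally[j]! = 0 := by
      simp [ht, List.getElem!_eq_getElem?_getD]
    rw [List.getElem!_eq_getElem?_getD, List.getElem?_eq_getElem hj1] at hA
    simp only [Option.getD_some] at hA
    rw [hA, htallyj, zero_add]
    have hjr : j < (List.range ((M - p).toNat + 1)).length := by simpa using hj2
    rw [List.getElem_map, List.getElem_range]
    by_cases hj : j = 0
    · subst hj
      rw [← hcount 0]
      simp
      omega
    · have hne : p + (j : Int) ≠ p := by
        intro hc; apply hj; omega
      rw [← hcount j]
      simp [hj, hne.symm]

-- ===== VERDICT (by name: the statement is the Claim_ definition above) =====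
theorem tally_sort_spec : Claim_equal_tally_sort := by
  intro num_list _ hpre
  exact tally_sort_spec_aux num_list hpre
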